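-- pv_equiv track=rewrite | github.com/thealper2/codewars-solutions | 7-kyu/minimum_and_maximum_product_of_k_elements.py | find_min_max_product
-- ===== SOURCE A (Python) =====
-- from itertools import combinations
-- from functools import reduce
--
-- def find_min_max_product(arr, k):
--     n = len(arr)
--     if k > n:
--         return
--
--     max_product = float('-inf')
--     min_product = float('inf')
--     for comb in combinations(arr, k):
--         prod = reduce(lambda x, y: x * y, comb)
--         max_product = max(max_product, prod)
--         min_product = min(min_product, prod)
--
--     return (min_product, max_product)
-- ===== SOURCE B (Python) =====
-- def _scale(p, x):
--     if p is None:
--         return None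
--     a, b = p
--     return (min(a * x, b * x), max(a * x, b * x))
--
--
-- def _combine(p, q):
--     if p is None:
--         return q
--     if q is None:
--         return p
--     return (min(p[0], q[0]), max(p[1], q[1]))
--
--
-- def find_min_max_product(arr, k):
--     n = len(arr)
--     if k > n:
--         return
--     # dp[j] = (min, max) product over j-element subsets of the processed elements
--     dp = [(1, 1)] + [None] * k
--     for x in reversed(arr):
--         dp = [dp[0]] + [_combine(_scale(prev, x), cur)
--                         for cur, prev in zip(dp[1:], dp)]
--     return dp[k]
-- ===== Notes on version B (the rewrite author's own statement) =====
-- stated objective: faster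
-- what changed: replaces A's exhaustive enumeration of all C(n,k) k-element combinations (taking the product of each) with an O(n*k) dynamic program that keeps, for each j <= k, the (min, max) product over j-element subsets of the elements seen so far
import Mathlib
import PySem

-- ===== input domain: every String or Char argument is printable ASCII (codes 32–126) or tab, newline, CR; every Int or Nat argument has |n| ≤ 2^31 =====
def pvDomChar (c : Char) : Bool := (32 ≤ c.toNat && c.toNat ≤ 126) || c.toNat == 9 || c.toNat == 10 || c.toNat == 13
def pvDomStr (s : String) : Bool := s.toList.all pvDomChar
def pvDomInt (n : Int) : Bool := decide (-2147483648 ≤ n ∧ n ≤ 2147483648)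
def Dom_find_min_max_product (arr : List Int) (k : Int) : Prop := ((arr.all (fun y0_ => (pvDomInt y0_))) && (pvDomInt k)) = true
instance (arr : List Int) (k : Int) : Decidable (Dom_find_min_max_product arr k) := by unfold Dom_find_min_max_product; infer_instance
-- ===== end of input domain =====

-- B replaces A's enumeration of all C(n,k) combinations by an O(n·k) dynamic
-- program over (min,max) products of j-element subsets (objective: faster).

-- ===== PORT A =====
-- itertools.combinations(arr, k) in its order (subsets keeping arr's order,
-- lexicographic by index): exact hand port.
def pvCombs : List Int → Nat → List (List Int)
  | _, 0 => [[]]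
  | [], _ + 1 => []
  | x :: xs, j + 1 => ((pvCombs xs j).map (fun c => x :: c)) ++ pvCombs xs (j + 1)

-- reduce(lambda x, y: x*y, comb); Python raises on [], which Pre_ excludes ([] never occurs for 1 ≤ k ≤ n)
def pvProd (c : List Int) : Int :=
  match c with
  | [] => 1
  | h :: t => t.foldl (· * ·) h

-- one loop iteration: min/max update (the float ±inf start is the none state)
def pvIns (acc : Option (Int × Int)) (p : Int) : Option (Int × Int) :=
  match acc with
  | none => some (p, p)
  | some (mn, mx) => some (min mn p, max mx p)

def find_min_max_product (arr : List Int) (k : Int) : Option (Int × Int) :=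
  if k > (arr.length : Int) then none
  else
    match (pvCombs arr k.toNat).foldl (fun acc c => pvIns acc (pvProd c)) none with
    | none => none   -- unreachable for 1 ≤ k ≤ n (Python would return floats ±inf)
    | some r => some r

-- ===== PORT B =====
def pvScale (p : Option (Int × Int)) (x : Int) : Option (Int × Int) :=
  match p with
  | none => none
  | some (a, b) => some (min (a * x) (b * x), max (a * x) (b * x))

def pvComb2 (p q : Option (Int × Int)) : Option (Int × Int) :=
  match p, q with
  | none, q => q
  | p, none => p
  | some (a, b), some (c, d) => some (min a c, max b d)

-- one pass of Source B's loop body: dp = [dp[0]] + [combine(scale(prev,x),cur) for cur,prev in zip(dp[1:],dp)]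
def pvStep (dp : List (Option (Int × Int))) (x : Int) : List (Option (Int × Int)) :=
  match dp with
  | [] => []
  | d0 :: rest => d0 :: List.zipWith (fun cur prev => pvComb2 (pvScale prev x) cur) rest dp

def find_min_max_product_alt (arr : List Int) (k : Int) : Option (Int × Int) :=
  if k > (arr.length : Int) then none
  else
    let dp := arr.reverse.foldl pvStep (some (1, 1) :: List.replicate k.toNat none)
    match PySem.List.pyGet? dp k with
    | none => none
    | some r => r

-- ===== PRECONDITION & SPEC =====
-- Pre_ excludes exactly k ≤ 0, where Python A raises (TypeError from reduce on the
-- empty tuple at k = 0, ValueError from combinations for k < 0); A returns on all other inputs.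
def Pre_find_min_max_product (_arr : List Int) (k : Int) : Prop := 1 ≤ k
instance (arr : List Int) (k : Int) : Decidable (Pre_find_min_max_product arr k) := by unfold Pre_find_min_max_product; infer_instance

def pvWitness_find_min_max_product : List Int × Int := ([2, -3, 4], 2)

def Spec_find_min_max_product (arr : List Int) (k : Int) (out : Option (Int × Int)) : Prop := out = find_min_max_product_alt arr k
instance (arr : List Int) (k : Int) (out : Option (Int × Int)) : Decidable (Spec_find_min_max_product arr k out) := by unfold Spec_find_min_max_product; infer_instance

-- ===== CLAIM (what is proved, stated in full; the proofs are below) =====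
def Claim_equal_find_min_max_product : Prop := ∀ (arr : List Int) (k : Int), Dom_find_min_max_product arr k → Pre_find_min_max_product arr k → Spec_find_min_max_product arr k (find_min_max_product arr k)

-- ===== LEMMAS AND PROOFS =====

-- extremes (min, max) of a list of products, as A's fold computes them
def pvE (ps : List Int) : Option (Int × Int) := ps.foldl pvIns none

-- extremes over products of all j-element subsets of ys
def pvMM (ys : List Int) (j : Nat) : Option (Int × Int) := pvE ((pvCombs ys j).map pvProd)

def pvMMP (ys : List Int) : Nat → Option (Int × Int)
  | 0 => none
  | j + 1 => pvMM ys j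

def pvOrd : Option (Int × Int) → Prop
  | none => True
  | some (a, b) => a ≤ b

theorem pvComb2_none_left (q : Option (Int × Int)) : pvComb2 none q = q := rfl

theorem pvComb2_none_right (p : Option (Int × Int)) : pvComb2 p none = p := by
  cases p <;> rfl

theorem pvComb2_assoc (p q r : Option (Int × Int)) :
    pvComb2 (pvComb2 p q) r = pvComb2 p (pvComb2 q r) := by
  rcases p with _ | ⟨a, b⟩ <;> rcases q with _ | ⟨c, d⟩ <;> rcases r with _ | ⟨e, f⟩ <;>
    simp [pvComb2, min_assoc, max_assoc]

theorem pvIns_eq (acc : Option (Int × Int)) (p : Int) :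
    pvIns acc p = pvComb2 acc (some (p, p)) := by
  rcases acc with _ | ⟨mn, mx⟩ <;> rfl

theorem foldl_pvIns (ps : List Int) : ∀ acc, ps.foldl pvIns acc = pvComb2 acc (pvE ps) := by
  induction ps with
  | nil => intro acc; simp [pvE, pvComb2_none_right]
  | cons p ps ih =>
    intro acc
    have h1 : pvE (p :: ps) = pvComb2 (some (p, p)) (pvE ps) := by
      show List.foldl pvIns (pvIns none p) ps = _
      rw [ih, pvIns_eq, pvComb2_none_left]
    rw [List.foldl_cons, ih, pvIns_eq, h1, pvComb2_assoc]

theorem pvE_cons (p : Int) (ps : List Int) : pvE (p :: ps) = pvComb2 (some (p, p)) (pvE ps) := by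
  show List.foldl pvIns (pvIns none p) ps = _
  rw [foldl_pvIns, pvIns_eq, pvComb2_none_left]

theorem pvE_append (ps qs : List Int) : pvE (ps ++ qs) = pvComb2 (pvE ps) (pvE qs) := by
  show (ps ++ qs).foldl pvIns none = _
  rw [List.foldl_append, foldl_pvIns]
  rfl

theorem pvOrd_comb2 (p q : Option (Int × Int)) (hp : pvOrd p) (hq : pvOrd q) :
    pvOrd (pvComb2 p q) := by
  rcases p with _ | ⟨a, b⟩ <;> rcases q with _ | ⟨c, d⟩ <;> simp_all [pvOrd, pvComb2]

theorem pvOrd_E (ps : List Int) : pvOrd (pvE ps) := by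
  induction ps with
  | nil => trivial
  | cons p ps ih =>
    rw [pvE_cons]
    exact pvOrd_comb2 _ _ (le_refl p) ih

theorem mul_min_right (p a x : Int) (hx : 0 ≤ x) : min p a * x = min (p * x) (a * x) := by
  rcases le_total p a with h | h
  · rw [min_eq_left h, min_eq_left (mul_le_mul_of_nonneg_right h hx)]
  · rw [min_eq_right h, min_eq_right (mul_le_mul_of_nonneg_right h hx)]

theorem mul_max_right (p a x : Int) (hx : 0 ≤ x) : max p a * x = max (p * x) (a * x) := by
  rcases le_total p a with h | h
  · rw [max_eq_right h, max_eq_right (mul_le_mul_of_nonneg_right h hx)]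
  · rw [max_eq_left h, max_eq_left (mul_le_mul_of_nonneg_right h hx)]

theorem mul_min_right_nonpos (p a x : Int) (hx : x ≤ 0) : min p a * x = max (p * x) (a * x) := by
  rcases le_total p a with h | h
  · rw [min_eq_left h, max_eq_left (mul_le_mul_of_nonpos_right h hx)]
  · rw [min_eq_right h, max_eq_right (mul_le_mul_of_nonpos_right h hx)]

theorem mul_max_right_nonpos (p a x : Int) (hx : x ≤ 0) : max p a * x = min (p * x) (a * x) := by
  rcases le_total p a with h | h
  · rw [max_eq_right h, min_eq_right (mul_le_mul_of_nonpos_right h hx)]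
  · rw [max_eq_left h, min_eq_left (mul_le_mul_of_nonpos_right h hx)]

theorem pvScale_comb_pair (p x : Int) (e : Option (Int × Int)) (he : pvOrd e) :
    pvScale (pvComb2 (some (p, p)) e) x = pvComb2 (some (p * x, p * x)) (pvScale e x) := by
  rcases e with _ | ⟨a, b⟩
  · simp [pvComb2, pvScale]
  · simp only [pvOrd] at he
    simp only [pvComb2, pvScale]
    rcases le_total 0 x with hx | hx
    · rw [mul_min_right _ _ _ hx, mul_max_right _ _ _ hx]
      have := mul_le_mul_of_nonneg_right he hx
      simp only [Option.some.injEq, Prod.mk.injEq]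
      omega
    · rw [mul_min_right_nonpos _ _ _ hx, mul_max_right_nonpos _ _ _ hx]
      have := mul_le_mul_of_nonpos_right he hx
      simp only [Option.some.injEq, Prod.mk.injEq]
      omega

theorem pvE_map_mul (x : Int) (ps : List Int) :
    pvE (ps.map (fun p => p * x)) = pvScale (pvE ps) x := by
  induction ps with
  | nil => rfl
  | cons p ps ih =>
    rw [List.map_cons, pvE_cons, pvE_cons, ih, pvScale_comb_pair _ _ _ (pvOrd_E ps)]

theorem foldl_mul_shift (t : List Int) : ∀ a x, t.foldl (· * ·) (x * a) = x * t.foldl (· * ·) a := by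
  induction t with
  | nil => intro a x; rfl
  | cons h t ih => intro a x; simp only [List.foldl_cons, mul_assoc, ih]

theorem pvProd_cons (x : Int) (c : List Int) : pvProd (x :: c) = x * pvProd c := by
  rcases c with _ | ⟨h, t⟩
  · simp [pvProd]
  · show (h :: t).foldl (· * ·) x = x * (t.foldl (· * ·) h)
    simp only [List.foldl_cons]
    have := foldl_mul_shift t h x
    simpa using this

theorem pvMM_head_step (x : Int) (ys : List Int) (j : Nat) :
    pvMM (x :: ys) j = pvComb2 (pvScale (pvMMP ys j) x) (pvMM ys j) := by
  cases j with
  | zero => simp [pvMM, pvMMP, pvCombs, pvScale, pvComb2]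
  | succ j =>
    show pvE (((pvCombs ys j).map (fun c => x :: c) ++ pvCombs ys (j + 1)).map pvProd) = _
    rw [List.map_append, pvE_append]
    congr 1
    show pvE (((pvCombs ys j).map (fun c => x :: c)).map pvProd) = pvScale (pvMM ys j) x
    rw [List.map_map]
    have h1 : (pvProd ∘ fun c => x :: c) = fun c => pvProd c * x := by
      funext c; simp [Function.comp, pvProd_cons, mul_comm]
    rw [h1, show (fun c => pvProd c * x) = ((fun p => p * x) ∘ pvProd) from rfl,
        ← List.map_map, pvE_map_mul]
    rfl

theorem pvStep_map (K : Nat) (ys : List Int) (x : Int) :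
    pvStep ((List.range (K + 1)).map (pvMM ys)) x = (List.range (K + 1)).map (pvMM (x :: ys)) := by
  have hr : List.range (K + 1) = 0 :: (List.range K).map Nat.succ := List.range_succ_eq_map
  rw [hr]
  simp only [List.map_cons, List.map_map]
  show pvMM ys 0 :: List.zipWith _ _ _ = pvMM (x :: ys) 0 :: _
  congr 1
  · simp [pvMM, pvCombs]
  apply List.ext_getElem
  · simp
  · intro i h1 h2
    rw [List.length_zipWith] at h1
    simp only [List.length_map, List.length_range, List.length_cons, min_def] at h1
    have hiK : i < K := by split at h1 <;> omega
    simp only [List.getElem_zipWith, List.getElem_map, List.getElem_range, Function.comp]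
    have hd : (pvMM ys 0 :: (List.range K).map (pvMM ys ∘ Nat.succ))[i]'
        (by simp; omega) = pvMMP ys (i + 1) := by
      rcases i with _ | i
      · rfl
      · simp only [List.getElem_cons_succ, List.getElem_map, List.getElem_range, Function.comp]
        rfl
    rw [hd, pvMM_head_step x ys (i + 1)]

theorem map_pvMM_nil (K : Nat) :
    (List.range (K + 1)).map (fun j => pvMM [] j) = some (1, 1) :: List.replicate K none := by
  have hr : List.range (K + 1) = 0 :: (List.range K).map Nat.succ := List.range_succ_eq_map
  rw [hr]
  simp only [List.map_cons, List.map_map]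
  congr 1
  apply List.ext_getElem
  · simp
  · intro i h1 h2
    simp only [List.getElem_map, List.getElem_range, Function.comp, List.getElem_replicate]
    rfl

theorem fold_invariant (K : Nat) (l : List Int) :
    l.foldl pvStep (some (1, 1) :: List.replicate K none)
      = (List.range (K + 1)).map (fun j => pvMM l.reverse j) := by
  induction l using List.reverseRecOn with
  | nil =>
    rw [List.foldl_nil, List.reverse_nil]
    exact (map_pvMM_nil K).symm
  | append_singleton l x ih =>
    rw [List.foldl_append, List.foldl_cons, List.foldl_nil, ih, List.reverse_append]
    simpa using pvStep_map K l.reverse x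

theorem find_min_max_product_spec : Claim_equal_find_min_max_product := by
  intro arr k _ hPre
  unfold Spec_find_min_max_product find_min_max_product find_min_max_product_alt
  have hk0 : (0 : Int) ≤ k := le_trans (by norm_num) hPre
  obtain ⟨K, rfl⟩ : ∃ K : Nat, k = (K : Int) := ⟨k.toNat, (Int.toNat_of_nonneg hk0).symm⟩
  by_cases h : (K : Int) > (arr.length : Int)
  · simp [h]
  · simp only [h, if_false, Int.toNat_natCast]
    have hA : (pvCombs arr K).foldl (fun acc c => pvIns acc (pvProd c)) none = pvMM arr K := by
      simp only [pvMM, pvE, List.foldl_map]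
    have hdp : arr.reverse.foldl pvStep (some (1, 1) :: List.replicate K none)
        = (List.range (K + 1)).map (fun j => pvMM arr j) := by
      rw [fold_invariant, List.reverse_reverse]
    rw [hA, hdp, PySem.List.pyGet?_natCast, List.getElem?_eq_getElem (by simp)]
    simp only [List.getElem_map, List.getElem_range]
    cases pvMM arr K <;> rfl
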